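-- pv_equiv track=rewrite | github.com/shaicoleman/technical-challenge | app/solver/solver.py | check
-- ===== SOURCE A (Python) =====
-- def check(solution, customers, mattes, glossy):
--     for customer in range(customers):
--         good = False
--         for i in range(len(solution)):
--             if solution[i] == 0 and i in mattes[customer]:
--                 good = True
--             if solution[i] == 1 and glossy.get(customer) == i:
--                 good = True
--         if not good:
--             return False
--     return True
-- ===== SOURCE B (Python) =====
-- def check(solution, customers, mattes, glossy):
--     # Index the matte positions once, then decide each customer by a
--     # disjointness test plus a single bounds-checked glossy lookup
--     # (no per-customer scan of every position).  When there are no matte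
--     # positions at all, only the glossy preference can satisfy anyone,
--     # so the mattes lookup is skipped entirely.
--     matte_at = {i for i, v in enumerate(solution) if v == 0}
--     n = len(solution)
--     for customer in range(customers):
--         if matte_at and not matte_at.isdisjoint(mattes[customer]):
--             continue
--         g = glossy.get(customer)
--         if g is not None and 0 <= g < n and solution[g] == 1:
--             continue
--         return False
--     return True
-- ===== Notes on version B (the rewrite author's own statement) =====
-- stated objective: alternative
-- what changed: A scans every position of solution once per customer; B builds the set of matte positions in one pass and then decides each customer by a set-disjointness test plus a single bounds-checked glossy lookup, with no per-customer scan of the positions.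
-- outside the precondition, e.g. on check([0], 2, [[]], {}): A returns False, B returns False
import Mathlib
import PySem

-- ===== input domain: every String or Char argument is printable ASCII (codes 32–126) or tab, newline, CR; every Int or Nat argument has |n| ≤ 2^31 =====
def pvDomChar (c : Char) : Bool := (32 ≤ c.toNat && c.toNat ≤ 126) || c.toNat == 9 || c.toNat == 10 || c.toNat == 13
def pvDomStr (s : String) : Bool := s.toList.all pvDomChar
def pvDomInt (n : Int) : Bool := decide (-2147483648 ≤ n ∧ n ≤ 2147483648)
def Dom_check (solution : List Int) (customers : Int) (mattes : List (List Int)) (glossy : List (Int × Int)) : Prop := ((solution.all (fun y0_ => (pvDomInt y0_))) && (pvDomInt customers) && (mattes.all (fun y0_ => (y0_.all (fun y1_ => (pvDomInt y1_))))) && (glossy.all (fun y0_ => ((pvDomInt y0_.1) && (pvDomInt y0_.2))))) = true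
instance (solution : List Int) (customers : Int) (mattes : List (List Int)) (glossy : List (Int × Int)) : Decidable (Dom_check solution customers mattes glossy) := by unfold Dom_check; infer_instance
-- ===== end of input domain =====

-- B indexes the matte positions once and judges each customer by a set-disjointness test
-- plus one bounds-checked glossy lookup, instead of A's per-customer scan of every position.


-- ===== PORT A =====
-- inner loop of A: for i in range(len(solution)): two ifs updating `good`.
-- mattes[customer] is ported with pyGetD default [] — inside Pre_check it is never
-- actually evaluated out of range on admitted inputs (see Pre_check).
def checkGoodA (solution : List Int) (mattes : List (List Int)) (glossy : List (Int × Int)) (c : Int) : Bool :=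
  (PySem.List.pyRange 0 (PySem.List.len solution) 1).foldl
    (fun good i =>
      let good := if PySem.List.pyGetD solution i 0 == 0 && decide (i ∈ PySem.List.pyGetD mattes c []) then true else good
      let good := if PySem.List.pyGetD solution i 0 == 1 && (PySem.Dict.get? (PySem.Dict.mk glossy) c == some i) then true else good
      good) false

-- outer loop of A with its early `return False`
def checkLoopA (solution : List Int) (mattes : List (List Int)) (glossy : List (Int × Int)) : List Int → Bool
  | [] => true
  | c :: rest =>
      if checkGoodA solution mattes glossy c then checkLoopA solution mattes glossy rest else false

def check (solution : List Int) (customers : Int) (mattes : List (List Int)) (glossy : List (Int × Int)) : Bool :=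
  checkLoopA solution mattes glossy (PySem.List.pyRange 0 customers 1)

-- ===== PORT B =====
-- matte_at = {i for i, v in enumerate(solution) if v == 0}
def matteSet (solution : List Int) : PySem.Set Int :=
  PySem.Set.ofList ((PySem.List.enumerate solution 0).filterMap
    (fun p => if p.2 == 0 then some p.1 else none))

-- B's customer loop: skip the mattes lookup when matte_at is empty; otherwise a
-- disjointness test, then one glossy lookup with a bounds check
def checkLoopB (solution : List Int) (mattes : List (List Int)) (glossy : List (Int × Int)) (matteAt : PySem.Set Int) : List Int → Bool
  | [] => true
  | c :: rest =>
      if !matteAt.isEmpty && !(PySem.Set.isdisjoint matteAt (PySem.List.pyGetD mattes c [])) then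
        checkLoopB solution mattes glossy matteAt rest
      else
        match PySem.Dict.get? (PySem.Dict.mk glossy) c with
        | some g =>
            if decide (0 ≤ g) && decide (g < PySem.List.len solution) && (PySem.List.pyGetD solution g 0 == 1) then
              checkLoopB solution mattes glossy matteAt rest
            else false
        | none => false

def check_alt (solution : List Int) (customers : Int) (mattes : List (List Int)) (glossy : List (Int × Int)) : Bool :=
  checkLoopB solution mattes glossy (matteSet solution) (PySem.List.pyRange 0 customers 1)

-- ===== PRECONDITION & SPEC =====
-- Pre_ excludes inputs where customers exceeds the number of matte lists WHILE solution
-- contains a 0: on those both Pythons raise IndexError on mattes[customer] as soon as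
-- such a customer is reached (they only return — the same False — when an earlier
-- customer already fails, so nothing returned by A is left unmatched).
def Pre_check (solution : List Int) (customers : Int) (mattes : List (List Int)) (glossy : List (Int × Int)) : Prop :=
  customers ≤ (mattes.length : Int) ∨ (0 : Int) ∉ solution
instance (solution : List Int) (customers : Int) (mattes : List (List Int)) (glossy : List (Int × Int)) : Decidable (Pre_check solution customers mattes glossy) := by unfold Pre_check; infer_instance

def pvWitness_check : List Int × Int × List (List Int) × (List (Int × Int)) :=
  ([0, 1], 2, [[0], [5]], [(1, 1)])

def Spec_check (solution : List Int) (customers : Int) (mattes : List (List Int)) (glossy : List (Int × Int)) (out : Bool) : Prop := out = check_alt solution customers mattes glossy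
instance (solution : List Int) (customers : Int) (mattes : List (List Int)) (glossy : List (Int × Int)) (out : Bool) : Decidable (Spec_check solution customers mattes glossy out) := by unfold Spec_check; infer_instance

-- ===== CLAIM (what is proved, stated in full; the proofs are below) =====
def Claim_equal_check : Prop := ∀ (solution : List Int) (customers : Int) (mattes : List (List Int)) (glossy : List (Int × Int)), Dom_check solution customers mattes glossy → Pre_check solution customers mattes glossy → Spec_check solution customers mattes glossy (check solution customers mattes glossy)

-- ===== LEMMAS AND PROOFS =====

lemma foldl_or_any (f : Int → Bool) (l : List Int) (b : Bool) :
    l.foldl (fun g i => f i || g) b = (b || l.any f) := by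
  induction l generalizing b with
  | nil => simp
  | cons x xs ih => simp only [List.foldl_cons, List.any_cons, ih]; cases b <;> cases f x <;> simp

lemma mem_matteSet (solution : List Int) (x : Int) :
    x ∈ matteSet solution ↔ ∃ k : Nat, k < solution.length ∧ x = (k : Int) ∧ solution[k]! = 0 := by
  simp only [matteSet, PySem.Set.mem_ofList, List.mem_filterMap, PySem.List.mem_enumerate_iff]
  constructor
  · rintro ⟨⟨i, v⟩, ⟨k, hk, hp⟩, hv⟩
    cases hp
    simp only [zero_add] at hv ⊢
    by_cases h0 : solution[k] = 0
    · simp only [h0, beq_self_eq_true, if_true, Option.some.injEq] at hv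
      exact ⟨k, hk, hv.symm, by simp [getElem!_pos, hk, h0]⟩
    · simp [h0] at hv
  · rintro ⟨k, hk, rfl, h0⟩
    refine ⟨((k : Int), solution[k]), ⟨k, hk, by simp⟩, ?_⟩
    have : solution[k] = 0 := by rwa [getElem!_pos] at h0
    simp [this]

lemma any_or_split (l : List Int) (p q : Int → Bool) :
    (l.any fun x => p x || q x) = (l.any p || l.any q) := by
  rw [Bool.eq_iff_iff]; simp only [List.any_eq_true, Bool.or_eq_true]
  constructor
  · rintro ⟨x, hx, h | h⟩
    · exact Or.inl ⟨x, hx, h⟩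
    · exact Or.inr ⟨x, hx, h⟩
  · rintro (⟨x, hx, h⟩ | ⟨x, hx, h⟩) <;> exact ⟨x, hx, by simp [h]⟩

lemma anyC1_eq (solution : List Int) (ms : List Int) :
    ((PySem.List.pyRange 0 (PySem.List.len solution) 1).any
        (fun i => PySem.List.pyGetD solution i 0 == 0 && decide (i ∈ ms)))
      = (!(matteSet solution).isEmpty && !(PySem.Set.isdisjoint (matteSet solution) ms)) := by
  rw [Bool.eq_iff_iff]
  have hrhs : (!(matteSet solution).isEmpty && !(PySem.Set.isdisjoint (matteSet solution) ms)) = true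
      ↔ ∃ x, x ∈ matteSet solution ∧ x ∈ ms := by
    simp only [Bool.and_eq_true, Bool.not_eq_true']
    constructor
    · rintro ⟨-, hd⟩
      by_contra hno
      push_neg at hno
      have : PySem.Set.isdisjoint (matteSet solution) ms = true :=
        (PySem.Set.isdisjoint_iff _ _).mpr (fun x hx hm => hno x hx hm)
      simp [this] at hd
    · rintro ⟨x, hx, hm⟩
      refine ⟨?_, ?_⟩
      · cases h : matteSet solution with
        | nil => rw [h] at hx; cases hx
        | cons a t => simp [List.isEmpty]
      · cases hd : PySem.Set.isdisjoint (matteSet solution) ms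
        · rfl
        · exact absurd hm ((PySem.Set.isdisjoint_iff _ _).mp hd x hx)
  rw [hrhs]
  simp only [List.any_eq_true, PySem.List.mem_pyRange_one, PySem.List.len_eq,
    Bool.and_eq_true, beq_iff_eq, decide_eq_true_eq, mem_matteSet]
  constructor
  · rintro ⟨i, ⟨h0, h1⟩, hz, hm⟩
    have hlt : i.toNat < solution.length := by omega
    rw [PySem.List.pyGetD_eq_getElem _ _ h0 (by omega)] at hz
    exact ⟨i, ⟨i.toNat, hlt, by omega, by simp [getElem!_pos, hlt, hz]⟩, hm⟩
  · rintro ⟨x, ⟨k, hk, rfl, h0⟩, hm⟩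
    have h0' : solution[k] = 0 := by rw [getElem!_pos solution k hk] at h0; exact h0
    refine ⟨(k : Int), ⟨by omega, by omega⟩, ?_, hm⟩
    rw [PySem.List.pyGetD_eq_getElem _ _ (by omega) (by simpa using hk)]
    simpa using h0'

lemma anyC2_eq (solution : List Int) (g : Int) :
    ((PySem.List.pyRange 0 (PySem.List.len solution) 1).any
        (fun i => PySem.List.pyGetD solution i 0 == 1 && (some g == some i)))
      = (decide (0 ≤ g) && decide (g < PySem.List.len solution) && (PySem.List.pyGetD solution g 0 == 1)) := by
  rw [Bool.eq_iff_iff]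
  simp only [List.any_eq_true, PySem.List.mem_pyRange_one, PySem.List.len_eq,
    Bool.and_eq_true, beq_iff_eq, decide_eq_true_eq, Option.some.injEq]
  constructor
  · rintro ⟨i, ⟨h0, h1⟩, hz, rfl⟩
    exact ⟨⟨h0, h1⟩, hz⟩
  · rintro ⟨⟨h0, h1⟩, hz⟩
    exact ⟨g, ⟨h0, h1⟩, hz, rfl⟩

lemma good_eq (solution : List Int) (mattes : List (List Int)) (glossy : List (Int × Int)) (c : Int) :
    checkGoodA solution mattes glossy c =
      ((!(matteSet solution).isEmpty && !(PySem.Set.isdisjoint (matteSet solution) (PySem.List.pyGetD mattes c [])))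
       || (match PySem.Dict.get? (PySem.Dict.mk glossy) c with
           | some g => decide (0 ≤ g) && decide (g < PySem.List.len solution) && (PySem.List.pyGetD solution g 0 == 1)
           | none => false)) := by
  have hstep : ∀ (C1 C2 : Int → Bool),
      (fun (good : Bool) (i : Int) =>
        let good := if C1 i then true else good
        let good := if C2 i then true else good
        good) = fun (good : Bool) (i : Int) => (C2 i || C1 i) || good := by
    intro C1 C2; funext good i
    simp only []
    cases h1 : C1 i <;> cases h2 : C2 i <;> simp
  rcases hg : PySem.Dict.get? (PySem.Dict.mk glossy) c with _ | g
  · unfold checkGoodA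
    simp only [hg]
    rw [hstep, foldl_or_any, Bool.false_or]
    rw [any_or_split]
    have h2 : ((PySem.List.pyRange 0 (PySem.List.len solution) 1).any
        (fun i => PySem.List.pyGetD solution i 0 == 1 && ((none : Option Int) == some i))) = false := by
      simp
    rw [h2, Bool.false_or, anyC1_eq, Bool.or_false]
  · unfold checkGoodA
    simp only [hg]
    rw [hstep, foldl_or_any, Bool.false_or, any_or_split, anyC2_eq, anyC1_eq, Bool.or_comm]

lemma loop_eq (solution : List Int) (mattes : List (List Int)) (glossy : List (Int × Int)) (cs : List Int) :
    checkLoopA solution mattes glossy cs = checkLoopB solution mattes glossy (matteSet solution) cs := by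
  induction cs with
  | nil => rfl
  | cons c rest ih =>
    rw [checkLoopA, checkLoopB, good_eq]
    rcases hg : PySem.Dict.get? (PySem.Dict.mk glossy) c with _ | g <;>
      cases hI : (!(matteSet solution).isEmpty && !(PySem.Set.isdisjoint (matteSet solution) (PySem.List.pyGetD mattes c []))) <;>
      simp [ih]

-- ===== VERDICT (by name: the statement is the Claim_ definition above) =====
theorem check_spec : Claim_equal_check := by
  intro solution customers mattes glossy _ _
  unfold Spec_check check check_alt
  exact loop_eq _ _ _ _
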